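-- pv_equiv track=rewrite | github.com/So-bonkers/Detecting-Convolutional-Codes-Via-Markovian-Statistics | comp_parity.py | encode_conv_general
-- ===== SOURCE A (Python) =====
-- from typing import List, Tuple
--
-- def encode_conv_general(u_bits_by_k: List[List[int]], gens_by_n_k: List[List[List[int]]], terminate: bool=True):
--     k = len(u_bits_by_k)
--     n = len(gens_by_n_k)
--     Lmax = 0
--     for outgens in gens_by_n_k:
--         for g in outgens:
--             Lmax = max(Lmax, len(g))
--     m = max(0, Lmax-1)
--     N = len(u_bits_by_k[0]) if k>0 else 0
--     if terminate:
--         T = N + m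
--         u_ext = [list(u) + [0]*m for u in u_bits_by_k]
--     else:
--         T = N
--         u_ext = [list(u) for u in u_bits_by_k]
--     outputs = [[0]*T for _ in range(n)]
--     for t in range(T):
--         for j in range(n):
--             s = 0
--             outgens = gens_by_n_k[j]
--             for i in range(k):
--                 g = outgens[i]
--                 for shift, bit in enumerate(g):
--                     if bit and (t - shift) >= 0:
--                         s ^= u_ext[i][t - shift]
--             outputs[j][t] = s
--     return outputs, T
-- ===== SOURCE B (Python) =====
-- from typing import List
--
--
-- def encode_conv_general(u_bits_by_k: List[List[int]], gens_by_n_k: List[List[List[int]]], terminate: bool = True):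
--     # Shift-register state machine: feed the bits in time order, read each tap out of
--     # a per-stream register, collect one output tuple per time step, transpose at the end.
--     Lmax = max((len(g) for og in gens_by_n_k for g in og), default=0)
--     m = max(0, Lmax - 1)
--     N = len(u_bits_by_k[0]) if u_bits_by_k else 0
--     T = N + m if terminate else N
--     u_ext = [u + [0] * m for u in u_bits_by_k] if terminate else [list(u) for u in u_bits_by_k]
--     regs = [[0] * Lmax for _ in u_ext]
--     rows = []
--     for t in range(T):
--         regs = [([u[t]] + reg)[:Lmax] for u, reg in zip(u_ext, regs)]
--         row = []
--         for outgens in gens_by_n_k: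
--             s = 0
--             for reg, g in zip(regs, outgens):
--                 for shift, bit in enumerate(g):
--                     if bit:
--                         s ^= reg[shift]
--             row.append(s)
--         rows.append(row)
--     return [[row[j] for row in rows] for j in range(len(gens_by_n_k))], T
-- ===== Notes on version B (the rewrite author's own statement) =====
-- stated objective: alternative
-- what changed: Replaces A's direct time-major gather convolution (for each output time, re-index u_ext[t-shift] for every tap) by a shift-register state machine: per-stream registers are shifted one bit per time step, taps are read from the registers, output tuples are collected time-major and transposed at the end.
-- outside the precondition, e.g. on encode_conv_general([[1, 0], [1]], [[[0, 0], [0]]], True): A returns ([[0, 0, 0]], 3), B raises IndexError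
import Mathlib
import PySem

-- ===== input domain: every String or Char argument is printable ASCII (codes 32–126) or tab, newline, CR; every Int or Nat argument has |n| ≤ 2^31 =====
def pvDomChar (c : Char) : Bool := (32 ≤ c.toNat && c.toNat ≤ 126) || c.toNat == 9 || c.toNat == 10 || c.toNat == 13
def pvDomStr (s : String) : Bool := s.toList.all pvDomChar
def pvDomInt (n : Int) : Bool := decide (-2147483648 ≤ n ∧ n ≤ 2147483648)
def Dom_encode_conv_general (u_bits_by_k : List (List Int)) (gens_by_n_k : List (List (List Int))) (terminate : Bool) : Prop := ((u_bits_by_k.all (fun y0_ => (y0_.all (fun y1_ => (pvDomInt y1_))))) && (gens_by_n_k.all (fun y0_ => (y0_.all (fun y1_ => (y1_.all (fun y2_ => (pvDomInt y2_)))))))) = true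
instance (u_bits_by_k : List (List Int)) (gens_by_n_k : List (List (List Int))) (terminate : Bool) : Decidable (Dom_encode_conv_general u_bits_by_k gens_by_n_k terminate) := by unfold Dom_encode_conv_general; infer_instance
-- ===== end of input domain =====

-- B replaces A's time-major gather convolution by a shift-register state machine (per-stream
-- registers shifted each step, outputs collected time-major, transposed at the end); an
-- alternative decomposition of the same cost; equivalence is about the return value only.

-- ===== PORT A =====
-- Literal port of A. Python's `enumerate(g)` is ported as `g.zipIdx` (element, index) — exact,
-- indices are the same nonnegative positions. `outgens[i]`, `u_bits_by_k[0]` and `u_ext[i][t-shift]`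
-- are ported with `getD` defaults; under Pre_ every such access is in range, so this is exact there.
-- `max(0, Lmax-1)` is Nat subtraction `Lmax - 1`. `s ^ x` is PySem.Int.bxor (Python-exact).
def encode_conv_general (u_bits_by_k : List (List Int)) (gens_by_n_k : List (List (List Int))) (terminate : Bool) : List (List Int) × Int :=
  let k := u_bits_by_k.length
  let n := gens_by_n_k.length
  let Lmax := gens_by_n_k.foldl (fun L og => og.foldl (fun L2 g => max L2 g.length) L) 0
  let m := Lmax - 1
  let N := if k > 0 then (u_bits_by_k.headD []).length else 0
  let T := if terminate then N + m else N
  let u_ext := if terminate then u_bits_by_k.map (fun r => r ++ List.replicate m 0)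
               else u_bits_by_k.map (fun r => r)
  let outputs := (List.range T).foldl (fun outs t =>
      (List.range n).foldl (fun outs j =>
        let outgens := gens_by_n_k.getD j []
        let s := (List.range k).foldl (fun s i =>
            let g := outgens.getD i []
            g.zipIdx.foldl (fun s bi =>
              if bi.1 ≠ 0 ∧ bi.2 ≤ t then PySem.Int.bxor s ((u_ext.getD i []).getD (t - bi.2) 0) else s) s) 0
        outs.set j ((outs.getD j []).set t s)) outs)
    (List.replicate n (List.replicate T (0:Int)))
  (outputs, (T : Int))

-- ===== PORT B =====
-- Literal port of Source B: per-stream shift registers (length Lmax, new bit consed in front and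
-- the register truncated each time step), taps read out of the registers with `reg[shift]`,
-- one output row per time step appended, and a final transpose. The generator-expression
-- `max(..., default=0)` is the foldl max over the flattened length list. `u[t]` and `row[j]`
-- are ported with `getD` defaults; under Pre_ every such access is in range, so this is exact there.
def encode_conv_general_alt (u_bits_by_k : List (List Int)) (gens_by_n_k : List (List (List Int))) (terminate : Bool) : List (List Int) × Int :=
  let Lmax := (gens_by_n_k.flatMap (fun og => og.map (fun g => g.length))).foldl max 0
  let m := Lmax - 1
  let N := if u_bits_by_k.length > 0 then (u_bits_by_k.headD []).length else 0
  let T := if terminate then N + m else N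
  let u_ext := if terminate then u_bits_by_k.map (fun r => r ++ List.replicate m 0)
               else u_bits_by_k.map (fun r => r)
  let st := (List.range T).foldl (fun st t =>
      let regs := (u_ext.zip st.1).map (fun p => ((p.1.getD t 0) :: p.2).take Lmax)
      let row := gens_by_n_k.map (fun outgens =>
          (regs.zip outgens).foldl (fun s rg =>
            rg.2.zipIdx.foldl (fun s bi =>
              if bi.1 ≠ 0 then PySem.Int.bxor s (rg.1.getD bi.2 0) else s) s) 0)
      (regs, st.2 ++ [row]))
    (u_ext.map (fun _ => List.replicate Lmax (0:Int)), ([] : List (List Int)))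
  ((List.range gens_by_n_k.length).map (fun j => st.2.map (fun row => row.getD j 0)), (T : Int))

-- ===== PRECONDITION & SPEC =====
-- total output length T (the ports' Lmax/m/N/T let-chain, definitionally equal)
def pvT (u_bits_by_k : List (List Int)) (gens_by_n_k : List (List (List Int))) (terminate : Bool) : Nat :=
  let Lmax := gens_by_n_k.foldl (fun L og => og.foldl (fun L2 g => max L2 g.length) L) 0
  let m := Lmax - 1
  let N := if u_bits_by_k.length > 0 then (u_bits_by_k.headD []).length else 0
  if terminate then N + m else N

-- Pre_ excludes ragged inputs with T > 0 — a data row shorter than the first row, or an output's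
-- generator list shorter than k — on which A raises IndexError except when every relevant tap is
-- zero (then A returns a zero matrix while B's register machine still raises; see claim cites).
def Pre_encode_conv_general (u_bits_by_k : List (List Int)) (gens_by_n_k : List (List (List Int))) (terminate : Bool) : Prop :=
  pvT u_bits_by_k gens_by_n_k terminate = 0 ∨
  ((∀ row ∈ u_bits_by_k, (u_bits_by_k.headD []).length ≤ row.length) ∧
   (u_bits_by_k = [] ∨ ∀ og ∈ gens_by_n_k, u_bits_by_k.length ≤ og.length))
instance (u_bits_by_k : List (List Int)) (gens_by_n_k : List (List (List Int))) (terminate : Bool) : Decidable (Pre_encode_conv_general u_bits_by_k gens_by_n_k terminate) := by unfold Pre_encode_conv_general; infer_instance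
def pvWitness_encode_conv_general : List (List Int) × List (List (List Int)) × Bool :=
  ([[1, 0, 1], [0, 1, 1]], [[[1, 0, 1], [1, 1]], [[1], [0, 1]]], true)
def Spec_encode_conv_general (u_bits_by_k : List (List Int)) (gens_by_n_k : List (List (List Int))) (terminate : Bool) (out : List (List Int) × Int) : Prop := out = encode_conv_general_alt u_bits_by_k gens_by_n_k terminate
instance (u_bits_by_k : List (List Int)) (gens_by_n_k : List (List (List Int))) (terminate : Bool) (out : List (List Int) × Int) : Decidable (Spec_encode_conv_general u_bits_by_k gens_by_n_k terminate out) := by unfold Spec_encode_conv_general; infer_instance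

-- ===== CLAIM (what is proved, stated in full; the proofs are below) =====
def Claim_equal_encode_conv_general : Prop := ∀ (u_bits_by_k : List (List Int)) (gens_by_n_k : List (List (List Int))) (terminate : Bool), Dom_encode_conv_general u_bits_by_k gens_by_n_k terminate → Pre_encode_conv_general u_bits_by_k gens_by_n_k terminate → Spec_encode_conv_general u_bits_by_k gens_by_n_k terminate (encode_conv_general u_bits_by_k gens_by_n_k terminate)

-- ===== LEMMAS AND PROOFS =====

-- one gather step at time t for a single (tap bit, tap index) of one stream
def pvStep (uext : List Int) (t : Nat) (s : Int) (bi : Int × Nat) : Int :=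
  if bi.1 ≠ 0 ∧ bi.2 ≤ t then PySem.Int.bxor s (uext.getD (t - bi.2) 0) else s

-- the per-bit gather value A writes at outputs[j][t]
def pvV (u_bits_by_k : List (List Int)) (gens_by_n_k : List (List (List Int))) (terminate : Bool) (j t : Nat) : Int :=
  let m := (gens_by_n_k.foldl (fun L og => og.foldl (fun L2 g => max L2 g.length) L) 0) - 1
  let u_ext := if terminate then u_bits_by_k.map (fun r => r ++ List.replicate m 0)
               else u_bits_by_k.map (fun r => r)
  let outgens := gens_by_n_k.getD j []
  (List.range u_bits_by_k.length).foldl (fun s i =>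
    (outgens.getD i []).zipIdx.foldl (fun s bi => pvStep (u_ext.getD i []) t s bi) s) 0

def pvUExt (u_bits_by_k : List (List Int)) (gens_by_n_k : List (List (List Int))) (terminate : Bool) : List (List Int) :=
  let Lmax := gens_by_n_k.foldl (fun L og => og.foldl (fun L2 g => max L2 g.length) L) 0
  let m := Lmax - 1
  if terminate then u_bits_by_k.map (fun r => r ++ List.replicate m 0)
  else u_bits_by_k.map (fun r => r)

-- state of stream i's register after t time steps
def pvReg (ui : List Int) (Lmax t : Nat) : List Int :=
  (List.range Lmax).map (fun sh => if sh < t then ui.getD (t - 1 - sh) 0 else 0)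

-- the first t time-major output rows of B's machine
def pvRows (uext : List (List Int)) (gens : List (List (List Int))) (t : Nat) : List (List Int) :=
  (List.range t).map (fun τ => gens.map (fun og =>
    (uext.zip og).foldl (fun s ug => ug.2.zipIdx.foldl (fun s bi => pvStep ug.1 τ s bi) s) 0))

lemma pv_getD_append_len {α : Type} (pre : List α) (r : α) (rs : List α) (d : α) :
    (pre ++ r :: rs).getD pre.length d = r := by
  induction pre with
  | nil => rfl
  | cons x xs ih => simp only [List.cons_append, List.length_cons, List.getD_cons_succ]; exact ih

lemma pv_set_append_len {α : Type} (pre : List α) (r x : α) (rs : List α) :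
    (pre ++ r :: rs).set pre.length x = pre ++ x :: rs := by
  induction pre with
  | nil => rfl
  | cons y ys ih => simp only [List.cons_append, List.length_cons, List.set_cons_succ]; rw [ih]

lemma pv_innerFill (w : Nat → List Int → List Int) :
    ∀ (rows pre : List (List Int)),
      List.foldl (fun o j => o.set j (w j (o.getD j []))) (pre ++ rows) (List.range' pre.length rows.length)
        = pre ++ rows.mapIdx (fun i r => w (pre.length + i) r) := by
  intro rows
  induction rows with
  | nil => intro pre; simp
  | cons r rs ih =>
    intro pre
    rw [List.length_cons, List.range'_succ, List.foldl_cons,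
        pv_getD_append_len, pv_set_append_len]
    have h1 : pre ++ w pre.length r :: rs = (pre ++ [w pre.length r]) ++ rs := by simp
    have h2 : (pre ++ [w pre.length r]).length = pre.length + 1 := by simp
    rw [h1, ← h2, ih (pre ++ [w pre.length r])]
    simp [List.mapIdx_cons, List.append_assoc]
    congr 1
    funext i r'
    congr 1
    omega

lemma pv_range_getD_zip {α β : Type} (Φ : Int → α → β → Int) (dx : α) (dy : β) :
    ∀ (xs : List α) (ys : List β) (a : Int), xs.length ≤ ys.length →
      (List.range xs.length).foldl (fun s i => Φ s (xs.getD i dx) (ys.getD i dy)) a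
        = (xs.zip ys).foldl (fun s p => Φ s p.1 p.2) a := by
  intro xs
  induction xs with
  | nil => intro ys a _; simp
  | cons x xs ih =>
    intro ys a hlen
    cases ys with
    | nil => simp at hlen
    | cons y ys =>
      rw [List.length_cons, List.range_succ_eq_map, List.foldl_cons, List.foldl_map]
      simp only [List.getD_cons_succ, List.getD_cons_zero, List.zip_cons_cons, List.foldl_cons]
      exact ih ys (Φ a x y) (by simpa using hlen)

-- A's time-major fill of the n × T matrix writes exactly v j t at row j, column t
lemma pv_fillMatrix (v : Nat → Nat → Int) (n T : Nat) :
    (List.range T).foldl (fun outs t =>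
        (List.range n).foldl (fun outs j => outs.set j ((outs.getD j []).set t (v j t))) outs)
      (List.replicate n (List.replicate T (0:Int)))
      = (List.range n).map (fun j => (List.range T).map (fun t => v j t)) := by
  have key : ∀ tm, tm ≤ T →
      (List.range tm).foldl (fun outs t =>
          (List.range n).foldl (fun outs j => outs.set j ((outs.getD j []).set t (v j t))) outs)
        (List.replicate n (List.replicate T (0:Int)))
        = (List.range n).map (fun j => (List.range T).map (fun t' => if t' < tm then v j t' else 0)) := by
    intro tm
    induction tm with
    | zero =>
      intro _
      apply List.ext_getElem (by simp)
      intro j h1 h2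
      simp
    | succ tm ih =>
      intro htm
      rw [List.range_succ, List.foldl_append, ih (by omega), List.foldl_cons, List.foldl_nil]
      set M := (List.range n).map (fun j => (List.range T).map (fun t' => if t' < tm then v j t' else 0)) with hM
      have hMlen : M.length = n := by simp [hM]
      have step : List.foldl (fun outs j => outs.set j ((outs.getD j []).set tm (v j tm))) M (List.range n)
          = M.mapIdx (fun i r => r.set tm (v i tm)) := by
        have := pv_innerFill (fun j row => row.set tm (v j tm)) M []
        simpa [hMlen, List.range_eq_range'] using this
      rw [step]
      apply List.ext_getElem (by simp [hM])
      intro j h1 h2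
      have hj : j < n := by simpa [hM] using h1
      apply List.ext_getElem (by simp [hM])
      intro t' ht1 ht2
      have ht'T : t' < T := by simpa [hM] using ht2
      simp only [List.getElem_mapIdx, hM, List.getElem_map, List.getElem_range]
      rw [List.getElem_set]
      by_cases hcase : tm = t'
      · subst hcase
        simp
      · simp only [hcase, if_false, List.getElem_map, List.getElem_range]
        by_cases h2' : t' < tm
        · simp [h2', show t' < tm + 1 by omega]
        · simp [h2', show ¬ t' < tm + 1 by omega]
  rw [key T le_rfl]
  apply List.map_congr_left
  intro j _
  apply List.map_congr_left
  intro t ht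
  simp [List.mem_range.mp ht]

lemma pv_A_char (u_bits_by_k : List (List Int)) (gens_by_n_k : List (List (List Int))) (terminate : Bool) :
    encode_conv_general u_bits_by_k gens_by_n_k terminate
      = ((List.range gens_by_n_k.length).map (fun j =>
            (List.range (pvT u_bits_by_k gens_by_n_k terminate)).map (fun t => pvV u_bits_by_k gens_by_n_k terminate j t)),
         ((pvT u_bits_by_k gens_by_n_k terminate) : Int)) := by
  exact congrArg (fun M => (M, ((pvT u_bits_by_k gens_by_n_k terminate) : Int)))
    (pv_fillMatrix (fun j t => pvV u_bits_by_k gens_by_n_k terminate j t) gens_by_n_k.length (pvT u_bits_by_k gens_by_n_k terminate))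

-- B's flattened max equals A's nested foldl max
lemma pv_Lmax_eq (gens : List (List (List Int))) :
    (gens.flatMap (fun og => og.map (fun g => g.length))).foldl max 0
      = gens.foldl (fun L og => og.foldl (fun L2 g => max L2 g.length) L) 0 := by
  simp [List.foldl_flatMap, List.foldl_map]

lemma pv_foldl_max_init_le (og : List (List Int)) : ∀ a : Nat, a ≤ og.foldl (fun L2 g => max L2 g.length) a := by
  induction og with
  | nil => intro a; simp
  | cons g gs ih => intro a; exact le_trans (le_max_left a g.length) (ih _)

lemma pv_mem_le_foldl_inner (og : List (List Int)) (g : List Int) (hg : g ∈ og) :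
    ∀ a : Nat, g.length ≤ og.foldl (fun L2 g => max L2 g.length) a := by
  induction og with
  | nil => cases hg
  | cons g' gs ih =>
    intro a
    rcases List.mem_cons.mp hg with rfl | h
    · exact le_trans (le_max_right a g.length) (pv_foldl_max_init_le gs _)
    · exact ih h _
lemma pv_outer_init_le (gens : List (List (List Int))) :
    ∀ a : Nat, a ≤ gens.foldl (fun L og => og.foldl (fun L2 g => max L2 g.length) L) a := by
  induction gens with
  | nil => intro a; simp
  | cons og gens ih => intro a; exact le_trans (pv_foldl_max_init_le og a) (ih _)

lemma pv_len_le_Lmax_aux (g : List Int) :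
    ∀ (gens : List (List (List Int))) (og : List (List Int)) (a : Nat), og ∈ gens → g ∈ og →
      g.length ≤ gens.foldl (fun L og => og.foldl (fun L2 g => max L2 g.length) L) a := by
  intro gens
  induction gens with
  | nil => intro og a hog; cases hog
  | cons og2 gens ih =>
    intro og a hog hg
    rcases List.mem_cons.mp hog with rfl | h
    · exact le_trans (pv_mem_le_foldl_inner og g hg a) (pv_outer_init_le gens _)
    · exact ih og _ h hg

lemma pv_len_le_Lmax (gens : List (List (List Int))) (og : List (List Int)) (g : List Int)
    (hog : og ∈ gens) (hg : g ∈ og) :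
    g.length ≤ gens.foldl (fun L og => og.foldl (fun L2 g => max L2 g.length) L) 0 :=
  pv_len_le_Lmax_aux g gens og 0 hog hg

-- shifting a new bit into a register
lemma pv_reg_step (ui : List Int) (Lmax t : Nat) :
    ((ui.getD t 0) :: pvReg ui Lmax t).take Lmax = pvReg ui Lmax (t + 1) := by
  apply List.ext_getElem (by simp [pvReg]; try omega)
  intro i h1 h2
  simp only [List.getElem_take]
  have hi : i < Lmax := by simpa [pvReg] using h2
  cases i with
  | zero => simp [pvReg]
  | succ i =>
    simp only [List.getElem_cons_succ, pvReg, List.getElem_map, List.getElem_range]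
    by_cases h : i < t
    · simp only [h, if_true, show i + 1 < t + 1 by omega, if_true]
      congr 1
      try omega
    · simp [h, show ¬ (i + 1 < t + 1) by omega]

lemma pv_regs_step (Lmax t : Nat) :
    ∀ (l : List (List Int)),
      (l.zip (l.map (fun ui => pvReg ui Lmax t))).map (fun p => ((p.1.getD t 0) :: p.2).take Lmax)
        = l.map (fun ui => pvReg ui Lmax (t + 1)) := by
  intro l
  induction l with
  | nil => rfl
  | cons x xs ih => simp only [List.map_cons, List.zip_cons_cons, pv_reg_step, ih]

-- reading one tap from the register equals A's gather step
lemma pv_tap_eq (ui : List Int) (Lmax t : Nat) (g : List Int) (hg : g.length ≤ Lmax) (s : Int) :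
    g.zipIdx.foldl (fun s bi =>
        if bi.1 ≠ 0 then PySem.Int.bxor s ((pvReg ui Lmax (t + 1)).getD bi.2 0) else s) s
      = g.zipIdx.foldl (fun s bi => pvStep ui t s bi) s := by
  apply PySem.List.foldl_congr_mem
  intro acc bi hbi
  obtain ⟨h1, h2, h3⟩ := List.mem_zipIdx hbi
  have hsh : bi.2 < g.length := by omega
  have hLm : bi.2 < Lmax := lt_of_lt_of_le hsh hg
  have hget : (pvReg ui Lmax (t + 1)).getD bi.2 0
      = if bi.2 ≤ t then ui.getD (t - bi.2) 0 else 0 := by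
    rw [List.getD_eq_getElem _ _ (by simpa [pvReg] using hLm)]
    simp only [pvReg, List.getElem_map, List.getElem_range]
    by_cases h : bi.2 ≤ t
    · simp only [show bi.2 < t + 1 by omega, if_true, h, if_true]
      congr 1
      try omega
    · simp [show ¬ (bi.2 < t + 1) by omega, h]
  rw [hget]
  unfold pvStep
  by_cases hb : bi.1 ≠ 0
  all_goals by_cases hts : bi.2 ≤ t
  all_goals simp [hb, hts]

-- one output row of the machine equals the zip-form gather row
lemma pv_row_eq (uext : List (List Int)) (Lmax t : Nat) (og : List (List Int))
    (hG : ∀ g ∈ og, g.length ≤ Lmax) :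
    ((uext.map (fun ui => pvReg ui Lmax (t + 1))).zip og).foldl (fun s rg =>
        rg.2.zipIdx.foldl (fun s bi =>
          if bi.1 ≠ 0 then PySem.Int.bxor s (rg.1.getD bi.2 0) else s) s) 0
      = (uext.zip og).foldl (fun s ug => ug.2.zipIdx.foldl (fun s bi => pvStep ug.1 t s bi) s) 0 := by
  rw [List.zip_map_left, List.foldl_map]
  apply PySem.List.foldl_congr_mem
  intro acc p hp
  exact pv_tap_eq p.1 Lmax t p.2 (hG p.2 (List.of_mem_zip hp).2) acc

-- the machine invariant: after t steps the registers hold the last Lmax bits and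
-- the rows are the first t gather rows
lemma pv_machine (uext : List (List Int)) (gens : List (List (List Int))) (Lmax : Nat)
    (hG : ∀ og ∈ gens, ∀ g ∈ og, g.length ≤ Lmax) : ∀ t : Nat,
    (List.range t).foldl (fun st τ =>
        let regs := (uext.zip st.1).map (fun p => ((p.1.getD τ 0) :: p.2).take Lmax)
        let row := gens.map (fun outgens =>
            (regs.zip outgens).foldl (fun s rg =>
              rg.2.zipIdx.foldl (fun s bi =>
                if bi.1 ≠ 0 then PySem.Int.bxor s (rg.1.getD bi.2 0) else s) s) 0)
        (regs, st.2 ++ [row]))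
      (uext.map (fun _ => List.replicate Lmax (0:Int)), ([] : List (List Int)))
      = (uext.map (fun ui => pvReg ui Lmax t), pvRows uext gens t) := by
  intro t
  induction t with
  | zero =>
    simp only [List.range_zero, List.foldl_nil, pvRows, List.map_nil]
    congr 1
    apply List.map_congr_left
    intro ui _
    simp [pvReg]
  | succ t ih =>
    rw [List.range_succ, List.foldl_append, ih, List.foldl_cons, List.foldl_nil]
    simp only [pv_regs_step]
    refine Prod.ext rfl ?_
    simp only [pvRows, List.range_succ, List.map_append, List.map_cons, List.map_nil]
    congr 1
    simp only [List.cons.injEq, and_true]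
    apply List.map_congr_left
    intro og hog
    exact pv_row_eq uext Lmax t og (hG og hog)

-- characterization of B: the transpose of the gather rows
lemma pv_B_char (u_bits_by_k : List (List Int)) (gens_by_n_k : List (List (List Int))) (terminate : Bool) :
    encode_conv_general_alt u_bits_by_k gens_by_n_k terminate
      = ((List.range gens_by_n_k.length).map (fun j =>
            (pvRows (pvUExt u_bits_by_k gens_by_n_k terminate) gens_by_n_k (pvT u_bits_by_k gens_by_n_k terminate)).map
              (fun row => row.getD j 0)),
         ((pvT u_bits_by_k gens_by_n_k terminate) : Int)) := by
  unfold encode_conv_general_alt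
  rw [pv_Lmax_eq]
  have key := pv_machine (pvUExt u_bits_by_k gens_by_n_k terminate) gens_by_n_k
      (gens_by_n_k.foldl (fun L og => og.foldl (fun L2 g => max L2 g.length) L) 0)
      (fun og hog g hg => pv_len_le_Lmax gens_by_n_k og g hog hg)
      (pvT u_bits_by_k gens_by_n_k terminate)
  exact congrArg (fun rows => ((List.range gens_by_n_k.length).map
      (fun j => rows.map (fun row => row.getD j 0)),
      ((pvT u_bits_by_k gens_by_n_k terminate) : Int))) (congrArg Prod.snd key)

-- ===== VERDICT (by name: the statement is the Claim_ definition above) =====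
theorem encode_conv_general_spec : Claim_equal_encode_conv_general := by
  intro u gens term _hdom hpre
  unfold Spec_encode_conv_general
  rw [pv_A_char, pv_B_char]
  set T := pvT u gens term with hT
  set UE := pvUExt u gens term with hUE
  have hUElen : UE.length = u.length := by
    rw [hUE]; unfold pvUExt; cases term <;> simp
  congr 1
  apply List.map_congr_left
  intro j hj
  have hjn : j < gens.length := List.mem_range.mp hj
  -- push the transpose through: column j of the rows
  rw [pvRows, List.map_map]
  apply List.map_congr_left
  intro t ht
  have htT : t < T := List.mem_range.mp ht
  have hrow : (gens.map (fun og => (UE.zip og).foldl (fun s ug => ug.2.zipIdx.foldl (fun s bi => pvStep ug.1 t s bi) s) 0)).getD j 0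
      = (UE.zip gens[j]).foldl (fun s ug => ug.2.zipIdx.foldl (fun s bi => pvStep ug.1 t s bi) s) 0 := by
    rw [List.getD_eq_getElem _ _ (by simpa using hjn), List.getElem_map]
  rw [Function.comp_apply, hrow]
  -- A's gather value via the range→zip bridge
  have hklen : UE.length ≤ gens[j].length := by
    rcases hpre with hT0 | ⟨-, hog⟩
    · exact absurd (hT ▸ hT0) (by omega)
    rcases hog with h | h
    · simp [hUElen, h]
    · rw [hUElen]; exact h gens[j] (List.getElem_mem hjn)
  have bridge := pv_range_getD_zip (fun s x y => y.zipIdx.foldl (fun s bi => pvStep x t s bi) s)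
      ([] : List Int) ([] : List Int) UE gens[j] 0 hklen
  show pvV u gens term j t = _
  unfold pvV
  rw [show u.length = UE.length from hUElen.symm,
      show gens.getD j [] = gens[j] from List.getD_eq_getElem gens [] hjn]
  exact bridge
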